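-- pv_equiv track=rewrite | github.com/Sparrow375/Mental-Health-Detection-ML | Swasthiti/app/src/main/python/s1_profile.py | _get_feature_group
-- ===== SOURCE A (Python) =====
-- def _get_feature_group(feat: str) -> str:
--     """Return the group name for a feature."""
--     groups = {
--         "screen_app": ["screenTimeHours", "unlockCount", "appLaunchCount",
--                        "notificationsToday", "socialAppRatio"],
--         "communication": ["callsPerDay", "callDurationMinutes", "uniqueContacts",
--                           "conversationFrequency"],
--         "location": ["dailyDisplacementKm", "locationEntropy", "homeTimeRatio",
--                      "placesVisited"],
--         "sleep": ["wakeTimeHour", "sleepTimeHour", "sleepDurationHours",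
--                   "darkDurationHours"],
--         "system": ["chargeDurationHours", "memoryUsagePercent", "networkWifiMB",
--                    "networkMobileMB", "storageUsedGB"],
--         "behavioral": ["totalAppsCount", "upiTransactionsToday", "appUninstallsToday",
--                        "appInstallsToday"],
--         "engagement": ["calendarEventsToday", "mediaCountToday", "downloadsToday",
--                        "backgroundAudioHours"],
--     }
--     for grp, feats in groups.items():
--         if feat in feats:
--             return grp
--     return "unknown"
-- ===== SOURCE B (Python) =====
-- _FEATURE_TO_GROUP = {
--     "screenTimeHours": "screen_app", "unlockCount": "screen_app",
--     "appLaunchCount": "screen_app", "notificationsToday": "screen_app",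
--     "socialAppRatio": "screen_app",
--     "callsPerDay": "communication", "callDurationMinutes": "communication",
--     "uniqueContacts": "communication", "conversationFrequency": "communication",
--     "dailyDisplacementKm": "location", "locationEntropy": "location",
--     "homeTimeRatio": "location", "placesVisited": "location",
--     "wakeTimeHour": "sleep", "sleepTimeHour": "sleep",
--     "sleepDurationHours": "sleep", "darkDurationHours": "sleep",
--     "chargeDurationHours": "system", "memoryUsagePercent": "system",
--     "networkWifiMB": "system", "networkMobileMB": "system",
--     "storageUsedGB": "system",
--     "totalAppsCount": "behavioral", "upiTransactionsToday": "behavioral",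
--     "appUninstallsToday": "behavioral", "appInstallsToday": "behavioral",
--     "calendarEventsToday": "engagement", "mediaCountToday": "engagement",
--     "downloadsToday": "engagement", "backgroundAudioHours": "engagement",
-- }
--
-- def _get_feature_group(feat: str) -> str:
--     """Return the group name for a feature."""
--     return _FEATURE_TO_GROUP.get(feat, "unknown")
-- ===== Notes on version B (the rewrite author's own statement) =====
-- stated objective: simpler
-- what changed: Replaces the loop over a group->features dict with an inner membership scan by a single precomputed inverted feature->group dict and one constant-time .get lookup with default 'unknown'.
import Mathlib
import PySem

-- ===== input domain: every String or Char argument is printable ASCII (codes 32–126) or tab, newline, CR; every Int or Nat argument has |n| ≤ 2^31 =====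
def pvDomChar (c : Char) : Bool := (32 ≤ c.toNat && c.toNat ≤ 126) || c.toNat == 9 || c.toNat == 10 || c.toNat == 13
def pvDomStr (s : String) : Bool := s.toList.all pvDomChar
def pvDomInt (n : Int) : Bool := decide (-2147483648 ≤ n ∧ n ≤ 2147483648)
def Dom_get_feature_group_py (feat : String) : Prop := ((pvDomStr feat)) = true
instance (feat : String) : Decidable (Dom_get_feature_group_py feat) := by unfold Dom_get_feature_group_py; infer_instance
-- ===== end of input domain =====

-- B replaces A's loop over a group->features dict (inner membership scan) by one
-- lookup in a precomputed inverted feature->group dict; objective: simpler.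

-- ===== PORT A =====
-- the dict literal 'groups' of A, as an insertion-ordered association list
def pvGroupsA : List (String × List String) :=
  [("screen_app", ["screenTimeHours", "unlockCount", "appLaunchCount",
                   "notificationsToday", "socialAppRatio"]),
   ("communication", ["callsPerDay", "callDurationMinutes", "uniqueContacts",
                      "conversationFrequency"]),
   ("location", ["dailyDisplacementKm", "locationEntropy", "homeTimeRatio",
                 "placesVisited"]),
   ("sleep", ["wakeTimeHour", "sleepTimeHour", "sleepDurationHours",
              "darkDurationHours"]),
   ("system", ["chargeDurationHours", "memoryUsagePercent", "networkWifiMB",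
               "networkMobileMB", "storageUsedGB"]),
   ("behavioral", ["totalAppsCount", "upiTransactionsToday", "appUninstallsToday",
                   "appInstallsToday"]),
   ("engagement", ["calendarEventsToday", "mediaCountToday", "downloadsToday",
                   "backgroundAudioHours"])]

-- the 'for grp, feats in groups.items(): if feat in feats: return grp' loop
def pvFindGroupA (items : List (String × List String)) (feat : String) : String :=
  match items with
  | [] => "unknown"
  | (grp, feats) :: rest => if feats.contains feat then grp else pvFindGroupA rest feat

def get_feature_group_py (feat : String) : String := pvFindGroupA pvGroupsA feat

-- ===== PORT B =====
-- B's module-level inverted dict _FEATURE_TO_GROUP (all keys distinct)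
def pvFeatureToGroup : PySem.Dict String String :=
  PySem.Dict.ofList
    [("screenTimeHours", "screen_app"), ("unlockCount", "screen_app"),
     ("appLaunchCount", "screen_app"), ("notificationsToday", "screen_app"),
     ("socialAppRatio", "screen_app"),
     ("callsPerDay", "communication"), ("callDurationMinutes", "communication"),
     ("uniqueContacts", "communication"), ("conversationFrequency", "communication"),
     ("dailyDisplacementKm", "location"), ("locationEntropy", "location"),
     ("homeTimeRatio", "location"), ("placesVisited", "location"),
     ("wakeTimeHour", "sleep"), ("sleepTimeHour", "sleep"),
     ("sleepDurationHours", "sleep"), ("darkDurationHours", "sleep"),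
     ("chargeDurationHours", "system"), ("memoryUsagePercent", "system"),
     ("networkWifiMB", "system"), ("networkMobileMB", "system"),
     ("storageUsedGB", "system"),
     ("totalAppsCount", "behavioral"), ("upiTransactionsToday", "behavioral"),
     ("appUninstallsToday", "behavioral"), ("appInstallsToday", "behavioral"),
     ("calendarEventsToday", "engagement"), ("mediaCountToday", "engagement"),
     ("downloadsToday", "engagement"), ("backgroundAudioHours", "engagement")]

def get_feature_group_py_alt (feat : String) : String :=
  PySem.Dict.getD pvFeatureToGroup feat "unknown"

-- ===== PRECONDITION & SPEC =====
def Spec_get_feature_group_py (feat : String) (out : String) : Prop := out = get_feature_group_py_alt feat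
instance (feat : String) (out : String) : Decidable (Spec_get_feature_group_py feat out) := by unfold Spec_get_feature_group_py; infer_instance

-- ===== CLAIM (what is proved, stated in full; the proofs are below) =====
def Claim_equal_get_feature_group_py : Prop := ∀ (feat : String), Dom_get_feature_group_py feat → Spec_get_feature_group_py feat (get_feature_group_py feat)

-- ===== LEMMAS AND PROOFS =====

-- ===== VERDICT (by name: the statement is the Claim_ definition above) =====
-- pvFeatureToGroup, whose keys are pairwise distinct, evaluates to the literal Dict.mk of its pair list
theorem pvFTG_eq_mk : pvFeatureToGroup = PySem.Dict.mk
    [("screenTimeHours", "screen_app"), ("unlockCount", "screen_app"),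
     ("appLaunchCount", "screen_app"), ("notificationsToday", "screen_app"),
     ("socialAppRatio", "screen_app"),
     ("callsPerDay", "communication"), ("callDurationMinutes", "communication"),
     ("uniqueContacts", "communication"), ("conversationFrequency", "communication"),
     ("dailyDisplacementKm", "location"), ("locationEntropy", "location"),
     ("homeTimeRatio", "location"), ("placesVisited", "location"),
     ("wakeTimeHour", "sleep"), ("sleepTimeHour", "sleep"),
     ("sleepDurationHours", "sleep"), ("darkDurationHours", "sleep"),
     ("chargeDurationHours", "system"), ("memoryUsagePercent", "system"),
     ("networkWifiMB", "system"), ("networkMobileMB", "system"),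
     ("storageUsedGB", "system"),
     ("totalAppsCount", "behavioral"), ("upiTransactionsToday", "behavioral"),
     ("appUninstallsToday", "behavioral"), ("appInstallsToday", "behavioral"),
     ("calendarEventsToday", "engagement"), ("mediaCountToday", "engagement"),
     ("downloadsToday", "engagement"), ("backgroundAudioHours", "engagement")] := by decide

set_option maxRecDepth 8192 in
theorem get_feature_group_py_spec : Claim_equal_get_feature_group_py := by
  intro feat _
  unfold Spec_get_feature_group_py
  by_cases h : feat ∈ ["screenTimeHours", "unlockCount", "appLaunchCount", "notificationsToday", "socialAppRatio", "callsPerDay", "callDurationMinutes", "uniqueContacts", "conversationFrequency", "dailyDisplacementKm", "locationEntropy", "homeTimeRatio", "placesVisited", "wakeTimeHour", "sleepTimeHour", "sleepDurationHours", "darkDurationHours", "chargeDurationHours", "memoryUsagePercent", "networkWifiMB", "networkMobileMB", "storageUsedGB", "totalAppsCount", "upiTransactionsToday", "appUninstallsToday", "appInstallsToday", "calendarEventsToday", "mediaCountToday", "downloadsToday", "backgroundAudioHours"]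
  · -- feat is one of the 30 feature strings: evaluate both ports on that literal
    simp only [List.mem_cons, List.not_mem_nil, or_false] at h
    rcases h with rfl|rfl|rfl|rfl|rfl|rfl|rfl|rfl|rfl|rfl|rfl|rfl|rfl|rfl|rfl|rfl|rfl|rfl|rfl|rfl|rfl|rfl|rfl|rfl|rfl|rfl|rfl|rfl|rfl|rfl <;> decide
  · -- feat is none of them: both sides fall through to "unknown"
    simp only [List.mem_cons, List.not_mem_nil, or_false, not_or] at h
    obtain ⟨h1, h2, h3, h4, h5, h6, h7, h8, h9, h10, h11, h12, h13, h14, h15, h16, h17, h18, h19, h20, h21, h22, h23, h24, h25, h26, h27, h28, h29, h30⟩ := h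
    unfold get_feature_group_py get_feature_group_py_alt
    rw [pvFTG_eq_mk]
    simp [pvGroupsA, pvFindGroupA, PySem.Dict.getD, PySem.Dict.get?,
          h1, Ne.symm h1, h2, Ne.symm h2, h3, Ne.symm h3, h4, Ne.symm h4, h5, Ne.symm h5, h6, Ne.symm h6, h7, Ne.symm h7, h8, Ne.symm h8, h9, Ne.symm h9, h10, Ne.symm h10, h11, Ne.symm h11, h12, Ne.symm h12, h13, Ne.symm h13, h14, Ne.symm h14, h15, Ne.symm h15, h16, Ne.symm h16, h17, Ne.symm h17, h18, Ne.symm h18, h19, Ne.symm h19, h20, Ne.symm h20, h21, Ne.symm h21, h22, Ne.symm h22, h23, Ne.symm h23, h24, Ne.symm h24, h25, Ne.symm h25, h26, Ne.symm h26, h27, Ne.symm h27, h28, Ne.symm h28, h29, Ne.symm h29, h30, Ne.symm h30]
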